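-- pv_equiv track=rewrite | github.com/margotrud/my-shopping-assistant | Chatbot/extractors/color/extract/categorizer.py | build_tone_modifier_mappings
-- ===== SOURCE A (Python) =====
-- from typing import List, Set, Dict, Tuple, Optional
-- from collections import defaultdict
--
-- def build_tone_modifier_mappings(
--     phrases: List[str],
--     known_tones: Set[str],
--     known_modifiers: Set[str]
-- ) -> Tuple[Set[str], Set[str], Dict[str, Set[str]], Dict[str, Set[str]]]:
--     tones = set()
--     modifiers = set()
--     modifier_to_tone = defaultdict(set)
--     tone_to_modifier = defaultdict(set)
--
--     for phrase in phrases: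
--         tokens = phrase.lower().split()
--         matched_tones = [t for t in tokens if t in known_tones]
--         matched_modifiers = [t for t in tokens if t in known_modifiers]
--
--         tones.update(matched_tones)
--         modifiers.update(matched_modifiers)
--
--         for mod in matched_modifiers:
--             for tone in matched_tones:
--                 modifier_to_tone[mod].add(tone)
--                 tone_to_modifier[tone].add(mod)
--
--     return tones, modifiers, modifier_to_tone, tone_to_modifier
-- ===== SOURCE B (Python) =====
-- from typing import List, Set, Dict, Tuple, Optional
-- from collections import defaultdict
--
-- def _group(pairs):
--     """Group a flat (key, value) pair list into a defaultdict(set): for each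
--     distinct key (first-occurrence order) collect all its values in one scan."""
--     grouped = defaultdict(set)
--     for key in dict.fromkeys(k for k, _ in pairs):
--         grouped[key] = {v for k, v in pairs if k == key}
--     return grouped
--
-- def build_tone_modifier_mappings(phrases, known_tones, known_modifiers):
--     token_lists = [p.lower().split() for p in phrases]
--     tones = {t for toks in token_lists for t in toks if t in known_tones}
--     modifiers = {m for toks in token_lists for m in toks if m in known_modifiers}
--     pairs = [(m, t) for toks in token_lists
--                     for m in toks if m in known_modifiers
--                     for t in toks if t in known_tones]
--     return tones, modifiers, _group(pairs), _group([(t, m) for m, t in pairs])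
-- ===== Notes on version B (the rewrite author's own statement) =====
-- stated objective: alternative
-- what changed: A incrementally mutates two defaultdicts element-by-element inside a nested mod/tone loop fused into the phrase loop; B never mutates a dict while iterating pairs: it materialises the co-occurrence relation as one flat (modifier, tone) pair list via comprehensions and computes each returned map by relational grouping (dedup the keys, then build each key's whole value set in one scan of the pair list), obtaining tone_to_modifier by grouping the transposed relation.
import Mathlib
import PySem

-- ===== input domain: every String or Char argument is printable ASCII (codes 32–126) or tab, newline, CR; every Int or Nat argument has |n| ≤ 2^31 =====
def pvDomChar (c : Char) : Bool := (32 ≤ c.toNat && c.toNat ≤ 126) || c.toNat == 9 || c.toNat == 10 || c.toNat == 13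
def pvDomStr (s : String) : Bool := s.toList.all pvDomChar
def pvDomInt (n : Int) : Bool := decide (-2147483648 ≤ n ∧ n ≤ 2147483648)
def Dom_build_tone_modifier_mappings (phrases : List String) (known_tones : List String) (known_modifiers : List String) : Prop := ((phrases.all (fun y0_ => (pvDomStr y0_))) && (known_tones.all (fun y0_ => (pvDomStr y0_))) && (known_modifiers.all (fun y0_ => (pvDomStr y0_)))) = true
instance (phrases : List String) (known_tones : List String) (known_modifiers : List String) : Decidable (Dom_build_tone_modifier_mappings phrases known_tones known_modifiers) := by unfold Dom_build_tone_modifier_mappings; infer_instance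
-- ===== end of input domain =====

-- B replaces A's fused phrase loop (which mutates two defaultdicts element-by-element in a nested
-- mod/tone loop) by comprehensions building a flat (modifier, tone) pair list, each returned map
-- then computed by relational grouping (dedup keys, one scan per key); objective: alternative.

-- ===== PORT A =====
-- A's loop body: tokens, two filter comprehensions, set.update, nested mod/tone defaultdict updates
def pvAStep (known_tones known_modifiers : List String)
    (st : PySem.Set String × PySem.Set String × PySem.Dict String (PySem.Set String) × PySem.Dict String (PySem.Set String))
    (phrase : String) :
    PySem.Set String × PySem.Set String × PySem.Dict String (PySem.Set String) × PySem.Dict String (PySem.Set String) :=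
  let tokens := PySem.Str.split₀ (PySem.Str.lower phrase)
  let matched_tones := tokens.filter (fun t => known_tones.contains t)
  let matched_modifiers := tokens.filter (fun t => known_modifiers.contains t)
  let tones := PySem.Set.update st.1 matched_tones
  let modifiers := PySem.Set.update st.2.1 matched_modifiers
  let dicts := matched_modifiers.foldl
    (fun (p : PySem.Dict String (PySem.Set String) × PySem.Dict String (PySem.Set String)) md =>
      matched_tones.foldl
        (fun (p : PySem.Dict String (PySem.Set String) × PySem.Dict String (PySem.Set String)) tone =>
          (p.1.modify md PySem.Set.empty (fun s => PySem.Set.add s tone),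
           p.2.modify tone PySem.Set.empty (fun s => PySem.Set.add s md))) p)
    (st.2.2.1, st.2.2.2)
  (tones, modifiers, dicts.1, dicts.2)

def build_tone_modifier_mappings (phrases : List String) (known_tones : List String) (known_modifiers : List String) : List String × List String × (List (String × List String)) × (List (String × List String)) :=
  let st := phrases.foldl (pvAStep known_tones known_modifiers)
    (PySem.Set.empty, PySem.Set.empty, PySem.Dict.empty, PySem.Dict.empty)
  (st.1, st.2.1, st.2.2.1.items, st.2.2.2.items)

-- ===== PORT B =====
-- Source B's _group: dedup the pair keys (dict.fromkeys), then assign each key its whole value set,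
-- collected by one scan of the pair list
def pvGroup (pairs : List (String × String)) : PySem.Dict String (PySem.Set String) :=
  (PySem.List.dedup (pairs.map (fun p => p.1))).foldl
    (fun d key => d.insert key (PySem.Set.ofList ((pairs.filter (fun p => p.1 == key)).map (fun p => p.2))))
    PySem.Dict.empty

-- literal transliteration of Source B: token lists, three comprehensions, two groupings
def build_tone_modifier_mappings_alt (phrases : List String) (known_tones : List String) (known_modifiers : List String) : List String × List String × (List (String × List String)) × (List (String × List String)) :=
  let token_lists := phrases.map (fun p => PySem.Str.split₀ (PySem.Str.lower p))
  let tones := PySem.Set.ofList (token_lists.flatMap (fun toks => toks.filter (fun t => known_tones.contains t)))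
  let modifiers := PySem.Set.ofList (token_lists.flatMap (fun toks => toks.filter (fun m => known_modifiers.contains m)))
  let pairs := token_lists.flatMap (fun toks =>
    (toks.filter (fun m => known_modifiers.contains m)).flatMap (fun m =>
      (toks.filter (fun t => known_tones.contains t)).map (fun t => (m, t))))
  (tones, modifiers, (pvGroup pairs).items, (pvGroup (pairs.map (fun p => (p.2, p.1)))).items)

-- ===== PRECONDITION & SPEC =====
def Spec_build_tone_modifier_mappings (phrases : List String) (known_tones : List String) (known_modifiers : List String) (out : List String × List String × (List (String × List String)) × (List (String × List String))) : Prop := out = build_tone_modifier_mappings_alt phrases known_tones known_modifiers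
instance (phrases : List String) (known_tones : List String) (known_modifiers : List String) (out : List String × List String × (List (String × List String)) × (List (String × List String))) : Decidable (Spec_build_tone_modifier_mappings phrases known_tones known_modifiers out) := by unfold Spec_build_tone_modifier_mappings; infer_instance

-- ===== CLAIM (what is proved, stated in full; the proofs are below) =====
def Claim_equal_build_tone_modifier_mappings : Prop := ∀ (phrases : List String) (known_tones : List String) (known_modifiers : List String), Dom_build_tone_modifier_mappings phrases known_tones known_modifiers → Spec_build_tone_modifier_mappings phrases known_tones known_modifiers (build_tone_modifier_mappings phrases known_tones known_modifiers)

-- ===== LEMMAS AND PROOFS =====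

-- A's matched-tone (resp. matched-modifier) list of a phrase
def pvMt (kt : List String) (p : String) : List String :=
  (PySem.Str.split₀ (PySem.Str.lower p)).filter (fun t => kt.contains t)

-- one (mod, tone) pair into both dicts (A's innermost loop body)
def pvPairStep (p : PySem.Dict String (PySem.Set String) × PySem.Dict String (PySem.Set String))
    (mt : String × String) :
    PySem.Dict String (PySem.Set String) × PySem.Dict String (PySem.Set String) :=
  (p.1.modify mt.1 PySem.Set.empty (fun s => PySem.Set.add s mt.2),
   p.2.modify mt.2 PySem.Set.empty (fun s => PySem.Set.add s mt.1))

-- A's per-phrase nested dict loop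
def pvDFold (kt km : List String) (p : String)
    (d : PySem.Dict String (PySem.Set String) × PySem.Dict String (PySem.Set String)) :
    PySem.Dict String (PySem.Set String) × PySem.Dict String (PySem.Set String) :=
  (pvMt km p).foldl (fun q m => (pvMt kt p).foldl (fun q t => pvPairStep q (m, t)) q) d

-- the single-dict modify/add fold over a pair list
def pvMFold (pairs : List (String × String)) (d : PySem.Dict String (PySem.Set String)) :
    PySem.Dict String (PySem.Set String) :=
  pairs.foldl (fun d p => d.modify p.1 PySem.Set.empty (fun s => PySem.Set.add s p.2)) d

-- A's fold over its 4-tuple state splits into three independent folds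
theorem pvAFold_split (kt km : List String) (phrases : List String)
    (s1 s2 : PySem.Set String)
    (d : PySem.Dict String (PySem.Set String) × PySem.Dict String (PySem.Set String)) :
    phrases.foldl (pvAStep kt km) (s1, s2, d.1, d.2)
      = (phrases.foldl (fun s p => PySem.Set.update s (pvMt kt p)) s1,
         phrases.foldl (fun s p => PySem.Set.update s (pvMt km p)) s2,
         phrases.foldl (fun q p => pvDFold kt km p q) d) := by
  induction phrases generalizing s1 s2 d with
  | nil => rfl
  | cons p ps ih =>
    simp only [List.foldl_cons]
    have hstep : pvAStep kt km (s1, s2, d.1, d.2) p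
        = (PySem.Set.update s1 (pvMt kt p), PySem.Set.update s2 (pvMt km p),
           (pvDFold kt km p d).1, (pvDFold kt km p d).2) := rfl
    rw [hstep, ih]

-- folding Set.update over a list of chunks is one update by the flattened list
theorem set_update_flat (chunks : List (List String)) (s : PySem.Set String) :
    chunks.foldl (fun s c => PySem.Set.update s c) s = PySem.Set.update s chunks.flatten := by
  induction chunks generalizing s with
  | nil => rfl
  | cons c cs ih =>
    rw [List.foldl_cons, ih, List.flatten_cons]
    simp [PySem.Set.update, List.foldl_append]

-- the set-building fold over phrases is set(flattened match stream)
theorem set_fold_eq (kt : List String) (phrases : List String) :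
    phrases.foldl (fun s p => PySem.Set.update s (pvMt kt p)) PySem.Set.empty
      = PySem.Set.ofList (phrases.flatMap (fun p => pvMt kt p)) := by
  rw [show phrases.foldl (fun s p => PySem.Set.update s (pvMt kt p)) PySem.Set.empty
        = (phrases.map (fun p => pvMt kt p)).foldl (fun s c => PySem.Set.update s c) PySem.Set.empty
      from (List.foldl_map).symm]
  rw [set_update_flat]
  simp [PySem.Set.ofList_eq_foldl, PySem.Set.update, PySem.Set.empty, List.flatMap_def]

-- lookup in the modify/add fold: the key's value is the accumulated set of its values in the pair list
theorem getD_pvMFold (pairs : List (String × String)) (d : PySem.Dict String (PySem.Set String))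
    (k : String) :
    (pvMFold pairs d).getD k PySem.Set.empty
      = PySem.Set.update (d.getD k PySem.Set.empty)
          ((pairs.filter (fun p => p.1 == k)).map (fun p => p.2)) := by
  induction pairs generalizing d with
  | nil => rfl
  | cons q qs ih =>
    simp only [pvMFold, List.foldl_cons] at *
    rw [ih]
    by_cases hk : q.1 = k
    · subst hk
      rw [PySem.Dict.getD_modify_self]
      simp [PySem.Set.update]
    · rw [PySem.Dict.getD_modify_of_ne _ _ _ (Ne.symm hk)]
      simp [hk]

-- keys of the modify/add fold from empty: first occurrences of keys, in order
theorem keys_pvMFold (pairs : List (String × String)) :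
    (pvMFold pairs PySem.Dict.empty).keys = PySem.List.dedup (pairs.map (fun p => p.1)) := by
  unfold pvMFold
  rw [PySem.Dict.keys_foldl_modify_key pairs (fun p => p.1) PySem.Set.empty
        (fun _ p => fun s => PySem.Set.add s p.2) PySem.Dict.empty]
  simp [PySem.Dict.keys_empty, PySem.List.dedup_eq_ofList, PySem.Set.ofList_eq_foldl, PySem.Set.update]

-- the modify/add fold from empty IS Source B's grouping
theorem pvMFold_eq_pvGroup (pairs : List (String × String)) :
    pvMFold pairs PySem.Dict.empty = pvGroup pairs := by
  apply PySem.Dict.ext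
  have hnd : (pvMFold pairs PySem.Dict.empty).keys.Nodup := by
    rw [keys_pvMFold]; exact PySem.List.nodup_dedup _
  rw [PySem.Dict.items_eq_map_keys _ hnd PySem.Set.empty, keys_pvMFold]
  have hfresh : ∀ a ∈ PySem.List.dedup (pairs.map (fun p => p.1)),
      (PySem.Dict.empty : PySem.Dict String (PySem.Set String)).contains a = false := by
    intro a _; simp [PySem.Dict.contains_empty]
  have hrhs := PySem.Dict.items_foldl_insert_fresh
    (l := PySem.List.dedup (pairs.map (fun p => p.1)))
    (k := fun key => key)
    (v := fun key => PySem.Set.ofList ((pairs.filter (fun p => p.1 == key)).map (fun p => p.2)))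
    (d := PySem.Dict.empty) hfresh (by simp)
  unfold pvGroup
  rw [hrhs]
  rw [show (PySem.Dict.empty : PySem.Dict String (PySem.Set String)).items = [] from rfl,
      List.nil_append]
  apply List.map_congr_left
  intro k _
  rw [getD_pvMFold]
  simp [PySem.Dict.getD_empty, PySem.Set.ofList_eq_foldl, PySem.Set.update, PySem.Set.empty]

-- A's nested per-phrase dict loops, run over all phrases, are one flat fold over the pair stream
theorem dict_fold_eq_pair_fold (kt km : List String) (phrases : List String)
    (d : PySem.Dict String (PySem.Set String) × PySem.Dict String (PySem.Set String)) :
    phrases.foldl (fun q p => pvDFold kt km p q) d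
      = (phrases.flatMap (fun p =>
          (pvMt km p).flatMap (fun m => (pvMt kt p).map (fun t => (m, t))))).foldl pvPairStep d := by
  simp only [List.foldl_flatMap, List.foldl_map, pvDFold]

-- the two-dict pair fold is the product of two single-dict folds (second on the transposed stream)
theorem pair_fold_split (pairs : List (String × String))
    (d1 d2 : PySem.Dict String (PySem.Set String)) :
    pairs.foldl pvPairStep (d1, d2)
      = (pvMFold pairs d1, pvMFold (pairs.map (fun p => (p.2, p.1))) d2) := by
  unfold pvMFold
  rw [List.foldl_map]
  exact PySem.List.foldl_prod_mk
    (fun d e => d.modify e.1 PySem.Set.empty (fun s => PySem.Set.add s e.2))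
    (fun d e => d.modify e.2 PySem.Set.empty (fun s => PySem.Set.add s e.1)) pairs d1 d2

-- ===== VERDICT (by name: the statement is the Claim_ definition above) =====
theorem build_tone_modifier_mappings_spec : Claim_equal_build_tone_modifier_mappings := by
  intro phrases kt km _
  unfold Spec_build_tone_modifier_mappings build_tone_modifier_mappings build_tone_modifier_mappings_alt
  rw [show ((PySem.Dict.empty : PySem.Dict String (PySem.Set String)), (PySem.Dict.empty : PySem.Dict String (PySem.Set String)))
        = (((PySem.Dict.empty : PySem.Dict String (PySem.Set String)), (PySem.Dict.empty : PySem.Dict String (PySem.Set String))).1,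
           ((PySem.Dict.empty : PySem.Dict String (PySem.Set String)), (PySem.Dict.empty : PySem.Dict String (PySem.Set String))).2) from rfl,
      pvAFold_split, dict_fold_eq_pair_fold, pair_fold_split, pvMFold_eq_pvGroup, pvMFold_eq_pvGroup]
  simp only [set_fold_eq]
  simp [pvMt, List.flatMap_map]
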